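-- pv_equiv track=rewrite | github.com/harryrrah0706/Compression-software | Compress & Decompress.py | EditCompressedFileDirectoryName
-- ===== SOURCE A (Python) =====
-- def EditCompressedFileDirectoryName(name):
--     name = list(name)
--     dot = False
--     for x in range(len(name)):
--         if name[x] == '.':
--             dot = True
--         if dot:
--             name[x] = ''
--     name = ''.join(name)
--     return name
-- ===== SOURCE B (Python) =====
-- def EditCompressedFileDirectoryName(name):
--     return name.partition('.')[0]
-- ===== Notes on version B (the rewrite author's own statement) =====
-- stated objective: simpler
-- what changed: B returns the segment before the first dot via str.partition, replacing A's flagged index loop that blanks characters in a char list and rejoins it.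
import Mathlib
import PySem

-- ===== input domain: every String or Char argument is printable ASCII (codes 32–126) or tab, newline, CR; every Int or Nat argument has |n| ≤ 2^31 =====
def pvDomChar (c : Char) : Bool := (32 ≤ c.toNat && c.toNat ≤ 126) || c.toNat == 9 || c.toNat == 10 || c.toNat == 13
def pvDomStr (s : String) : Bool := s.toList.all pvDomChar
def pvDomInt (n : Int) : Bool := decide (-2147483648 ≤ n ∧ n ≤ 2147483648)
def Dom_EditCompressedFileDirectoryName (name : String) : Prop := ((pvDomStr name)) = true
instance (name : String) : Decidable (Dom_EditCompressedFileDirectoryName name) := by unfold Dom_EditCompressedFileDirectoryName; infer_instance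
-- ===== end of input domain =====

-- B replaces A's blank-after-dot char-list loop with taking the prefix before the first '.'; simpler, same result.


-- ===== PORT A =====
-- A: convert to a char list (each char a one-char string, blanked chars become []),
-- blank everything from the first '.' on, rejoin with ''.join.
def pvStep (st : Bool × List (List Char)) (x : List Char) : Bool × List (List Char) :=
  let dot := st.1 || (x == ['.'])
  (dot, st.2 ++ [if dot then [] else x])

def EditCompressedFileDirectoryName (name : String) : String :=
  let chars : List (List Char) := name.toList.map (fun c => [c])
  let res := chars.foldl pvStep (false, [])
  String.mk (PySem.Chars.join [] res.2)

-- ===== PORT B =====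
-- B: name.partition('.')[0] — the characters before the first '.'.
def EditCompressedFileDirectoryName_alt (name : String) : String :=
  String.mk (name.toList.takeWhile (fun c => c != '.'))

-- ===== PRECONDITION & SPEC =====
def Spec_EditCompressedFileDirectoryName (name : String) (out : String) : Prop := out = EditCompressedFileDirectoryName_alt name
instance (name : String) (out : String) : Decidable (Spec_EditCompressedFileDirectoryName name out) := by unfold Spec_EditCompressedFileDirectoryName; infer_instance

-- ===== CLAIM (what is proved, stated in full; the proofs are below) =====
def Claim_equal_EditCompressedFileDirectoryName : Prop := ∀ (name : String), Dom_EditCompressedFileDirectoryName name → Spec_EditCompressedFileDirectoryName name (EditCompressedFileDirectoryName name)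

-- ===== LEMMAS AND PROOFS =====

theorem pv_join_flatten (l : List (List Char)) :
    PySem.Chars.join ([] : List Char) l = l.flatten := by
  induction l with
  | nil => simp [PySem.Chars.join, List.intercalate]
  | cons a t ih =>
    cases t with
    | nil => simp [PySem.Chars.join, List.intercalate]
    | cons b r =>
      rw [PySem.Chars.join_cons_cons]
      simp [ih]

theorem pv_fold_true (cs : List Char) : ∀ acc : List (List Char),
    (((cs.map (fun c => [c])).foldl pvStep (true, acc)).2).flatten = acc.flatten := by
  induction cs with
  | nil => intro acc; simp
  | cons c t ih =>
    intro acc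
    simp only [List.map_cons, List.foldl_cons, pvStep, Bool.true_or, if_pos]
    rw [ih (acc ++ [[]])]
    simp

theorem pv_fold_false (cs : List Char) : ∀ acc : List (List Char),
    (((cs.map (fun c => [c])).foldl pvStep (false, acc)).2).flatten
      = acc.flatten ++ cs.takeWhile (fun c => c != '.') := by
  induction cs with
  | nil => intro acc; simp
  | cons c t ih =>
    intro acc
    simp only [List.map_cons, List.foldl_cons, pvStep, Bool.false_or, List.takeWhile_cons]
    by_cases h : c = '.'
    · subst h
      rw [show (([('.' : Char)] == ['.'])) = true by simp]
      simp only [if_true]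
      rw [pv_fold_true t (acc ++ [[]])]
      simp
    · have hb : ([c] == ['.']) = false := by
        simp [h]
      rw [hb]
      simp only [Bool.false_eq_true, if_false]
      rw [ih (acc ++ [[c]])]
      simp [h]


-- ===== VERDICT (by name: the statement is the Claim_ definition above) =====
theorem EditCompressedFileDirectoryName_spec : Claim_equal_EditCompressedFileDirectoryName := by
  intro name _
  show _ = _
  unfold EditCompressedFileDirectoryName EditCompressedFileDirectoryName_alt
  simp only [pv_join_flatten]
  rw [pv_fold_false name.toList []]
  simp
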